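-- pv_equiv track=rewrite | github.com/KolmogorovLab/Wakhan | src/utils.py | loh_regions_phasesets
-- ===== SOURCE A (Python) =====
-- def loh_regions_phasesets(loh_region_starts, loh_region_ends, haplotype_1_values_phasesets, haplotype_2_values_phasesets, ref_start_values_phasesets, ref_end_values_phasesets):
--     indices = []
--     for l, (loh_start, loh_end) in enumerate(zip(loh_region_starts, loh_region_ends)):
--         for k, (ps_start, ps_end) in enumerate(zip(ref_start_values_phasesets, ref_end_values_phasesets)):
--             if ps_start >= loh_start and ps_end <= loh_end:
--                 indices.append(k)
--
--     haplotype_1_values_phasesets = [j for i, j in enumerate(haplotype_1_values_phasesets) if i not in indices]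
--     haplotype_2_values_phasesets = [j for i, j in enumerate(haplotype_2_values_phasesets) if i not in indices]
--     ref_start_values_phasesets = [j for i, j in enumerate(ref_start_values_phasesets) if i not in indices]
--     ref_end_values_phasesets = [j for i, j in enumerate(ref_end_values_phasesets) if i not in indices]
--
--     return haplotype_1_values_phasesets, haplotype_2_values_phasesets, ref_start_values_phasesets, ref_end_values_phasesets
-- ===== SOURCE B (Python) =====
-- def loh_regions_phasesets(loh_region_starts, loh_region_ends, haplotype_1_values_phasesets, haplotype_2_values_phasesets, ref_start_values_phasesets, ref_end_values_phasesets):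
--     # Sort LOH regions by start and precompute prefix maxima of their ends;
--     # a phaseset (s, e) is contained in some region iff the max end among
--     # regions with start <= s is >= e, found by binary search in O(log L).
--     regions = sorted(zip(loh_region_starts, loh_region_ends), key=lambda r: r[0])
--     starts = [r[0] for r in regions]
--     cur = None
--     pref = []
--     for a, b in regions:
--         cur = b if cur is None else max(cur, b)
--         pref.append(cur)
--
--     def contained(s, e):
--         lo, hi = 0, len(starts)
--         while lo < hi:
--             mid = (lo + hi) // 2
--             if starts[mid] <= s:
--                 lo = mid + 1
--             else:
--                 hi = mid
--         return lo > 0 and e <= pref[lo - 1]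
--
--     removed = [contained(s, e) for s, e in zip(ref_start_values_phasesets, ref_end_values_phasesets)]
--
--     def keep(xs):
--         return [x for i, x in enumerate(xs) if not (i < len(removed) and removed[i])]
--
--     return (keep(haplotype_1_values_phasesets), keep(haplotype_2_values_phasesets),
--             keep(ref_start_values_phasesets), keep(ref_end_values_phasesets))
-- ===== Notes on version B (the rewrite author's own statement) =====
-- stated objective: faster
-- what changed: Replaces A's nested region-by-phaseset containment scan and linear 'i not in indices' filter probes by sorting the LOH regions by start once, precomputing prefix maxima of their ends, and answering each phaseset's containment query with a binary search plus a boolean mask.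
import Mathlib
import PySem

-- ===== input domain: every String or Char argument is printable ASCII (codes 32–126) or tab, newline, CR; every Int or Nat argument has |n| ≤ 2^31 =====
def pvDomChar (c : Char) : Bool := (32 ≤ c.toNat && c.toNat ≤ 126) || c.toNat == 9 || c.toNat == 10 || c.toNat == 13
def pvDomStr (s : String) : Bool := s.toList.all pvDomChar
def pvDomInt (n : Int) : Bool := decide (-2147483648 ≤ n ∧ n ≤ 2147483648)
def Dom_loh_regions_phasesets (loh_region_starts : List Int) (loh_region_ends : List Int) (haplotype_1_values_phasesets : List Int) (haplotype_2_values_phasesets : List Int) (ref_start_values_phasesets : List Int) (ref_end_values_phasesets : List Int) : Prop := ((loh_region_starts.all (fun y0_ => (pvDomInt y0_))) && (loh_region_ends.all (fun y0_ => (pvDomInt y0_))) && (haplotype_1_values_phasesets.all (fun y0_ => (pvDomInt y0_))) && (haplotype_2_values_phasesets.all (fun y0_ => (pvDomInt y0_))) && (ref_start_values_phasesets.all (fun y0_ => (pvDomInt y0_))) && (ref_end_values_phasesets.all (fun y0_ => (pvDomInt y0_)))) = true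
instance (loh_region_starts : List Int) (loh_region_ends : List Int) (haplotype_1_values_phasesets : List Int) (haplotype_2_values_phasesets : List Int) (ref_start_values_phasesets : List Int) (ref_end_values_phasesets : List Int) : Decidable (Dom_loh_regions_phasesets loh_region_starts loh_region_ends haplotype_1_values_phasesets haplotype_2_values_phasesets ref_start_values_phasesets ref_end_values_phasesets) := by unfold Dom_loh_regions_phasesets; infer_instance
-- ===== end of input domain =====

-- B sorts the LOH regions by start, precomputes prefix maxima of their ends, and answers each
-- phaseset's containment query by binary search; objective: asymptotically faster queries.

-- ===== PORT A =====
-- A's nested loop building 'indices' (with duplicates)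
def pvIndicesA (loh_region_starts loh_region_ends ref_start_values_phasesets ref_end_values_phasesets : List Int) : List Int :=
  (PySem.List.enumerate (loh_region_starts.zip loh_region_ends)).foldl (fun acc lp =>
    (PySem.List.enumerate (ref_start_values_phasesets.zip ref_end_values_phasesets)).foldl (fun acc2 kp =>
      if kp.2.1 ≥ lp.2.1 ∧ kp.2.2 ≤ lp.2.2 then acc2 ++ [kp.1] else acc2) acc) []

-- A's '[j for i, j in enumerate(xs) if i not in indices]'
def pvDropA (indices : List Int) (xs : List Int) : List Int :=
  ((PySem.List.enumerate xs).filter (fun p => !(indices.contains p.1))).map (·.2)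

def loh_regions_phasesets (loh_region_starts : List Int) (loh_region_ends : List Int) (haplotype_1_values_phasesets : List Int) (haplotype_2_values_phasesets : List Int) (ref_start_values_phasesets : List Int) (ref_end_values_phasesets : List Int) : List Int × List Int × List Int × List Int :=
  let indices := pvIndicesA loh_region_starts loh_region_ends ref_start_values_phasesets ref_end_values_phasesets
  (pvDropA indices haplotype_1_values_phasesets,
   pvDropA indices haplotype_2_values_phasesets,
   pvDropA indices ref_start_values_phasesets,
   pvDropA indices ref_end_values_phasesets)

-- ===== PORT B =====
-- B's 'while lo < hi: mid = (lo + hi) // 2; …' binary search (lo, hi stay in [0, len(starts)],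
-- so Nat indices and 'getD … 0' make the same reads as Python's in-range 'starts[mid]')
-- the 'while lo < hi' loop, made total by a fuel that bounds the iteration count
-- (fuel = hi - lo at the call sites; each step shrinks hi - lo, so the fuel never runs out)
def pvBsr (starts : List Int) (s : Int) : Nat → Nat → Nat → Nat
  | 0, lo, _hi => lo
  | fuel + 1, lo, hi =>
    if lo < hi then
      if starts.getD ((lo + hi) / 2) 0 ≤ s then pvBsr starts s fuel ((lo + hi) / 2 + 1) hi
      else pvBsr starts s fuel lo ((lo + hi) / 2)
    else lo

-- B's 'contained(s, e)' ('n = bisect; return n > 0 and e <= pref[n-1]', n inlined)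
def pvContained (starts pref : List Int) (s e : Int) : Bool :=
  decide (0 < pvBsr starts s starts.length 0 starts.length) &&
  decide (e ≤ pref.getD (pvBsr starts s starts.length 0 starts.length - 1) 0)

-- B's '[x for i, x in enumerate(xs) if not (i < len(removed) and removed[i])]'
def pvKeepB (removed : List Bool) (xs : List Int) : List Int :=
  ((PySem.List.enumerate xs).filter (fun p =>
    !(decide (p.1.toNat < removed.length) && removed.getD p.1.toNat false))).map (·.2)

def loh_regions_phasesets_alt (loh_region_starts : List Int) (loh_region_ends : List Int) (haplotype_1_values_phasesets : List Int) (haplotype_2_values_phasesets : List Int) (ref_start_values_phasesets : List Int) (ref_end_values_phasesets : List Int) : List Int × List Int × List Int × List Int :=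
  let regions := PySem.List.sorted (loh_region_starts.zip loh_region_ends) (fun r => r.1)
  let starts := regions.map (fun r => r.1)
  -- 'cur = None; pref = []; for a, b in regions: cur = b if cur is None else max(cur, b); pref.append(cur)'
  let pref := (regions.foldl (fun (st : Option Int × List Int) r =>
      let cur := match st.1 with | none => r.2 | some c => max c r.2
      (some cur, st.2 ++ [cur])) (none, [])).2
  let removed := (ref_start_values_phasesets.zip ref_end_values_phasesets).map
      (fun p => pvContained starts pref p.1 p.2)
  (pvKeepB removed haplotype_1_values_phasesets,
   pvKeepB removed haplotype_2_values_phasesets,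
   pvKeepB removed ref_start_values_phasesets,
   pvKeepB removed ref_end_values_phasesets)

-- ===== PRECONDITION & SPEC =====
def Spec_loh_regions_phasesets (loh_region_starts : List Int) (loh_region_ends : List Int) (haplotype_1_values_phasesets : List Int) (haplotype_2_values_phasesets : List Int) (ref_start_values_phasesets : List Int) (ref_end_values_phasesets : List Int) (out : List Int × List Int × List Int × List Int) : Prop := out = loh_regions_phasesets_alt loh_region_starts loh_region_ends haplotype_1_values_phasesets haplotype_2_values_phasesets ref_start_values_phasesets ref_end_values_phasesets
instance (loh_region_starts : List Int) (loh_region_ends : List Int) (haplotype_1_values_phasesets : List Int) (haplotype_2_values_phasesets : List Int) (ref_start_values_phasesets : List Int) (ref_end_values_phasesets : List Int) (out : List Int × List Int × List Int × List Int) : Decidable (Spec_loh_regions_phasesets loh_region_starts loh_region_ends haplotype_1_values_phasesets haplotype_2_values_phasesets ref_start_values_phasesets ref_end_values_phasesets out) := by unfold Spec_loh_regions_phasesets; infer_instance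

-- ===== CLAIM (what is proved, stated in full; the proofs are below) =====
def Claim_equal_loh_regions_phasesets : Prop := ∀ (loh_region_starts : List Int) (loh_region_ends : List Int) (haplotype_1_values_phasesets : List Int) (haplotype_2_values_phasesets : List Int) (ref_start_values_phasesets : List Int) (ref_end_values_phasesets : List Int), Dom_loh_regions_phasesets loh_region_starts loh_region_ends haplotype_1_values_phasesets haplotype_2_values_phasesets ref_start_values_phasesets ref_end_values_phasesets → Spec_loh_regions_phasesets loh_region_starts loh_region_ends haplotype_1_values_phasesets haplotype_2_values_phasesets ref_start_values_phasesets ref_end_values_phasesets (loh_regions_phasesets loh_region_starts loh_region_ends haplotype_1_values_phasesets haplotype_2_values_phasesets ref_start_values_phasesets ref_end_values_phasesets)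

-- ===== LEMMAS AND PROOFS =====

-- the 'any LOH region contains (s, e)' mask (proof-side bridge between the two programs)
def pvMask (loh_region_starts loh_region_ends ref_start_values_phasesets ref_end_values_phasesets : List Int) : List Bool :=
  (ref_start_values_phasesets.zip ref_end_values_phasesets).map (fun p =>
    (loh_region_starts.zip loh_region_ends).any (fun q => decide (q.1 ≤ p.1 ∧ p.2 ≤ q.2)))

-- recursive form of B's prefix-max list
def pvPmaxGo (cur : Int) : List Int → List Int
  | [] => []
  | b :: t => max cur b :: pvPmaxGo (max cur b) t

-- A's 'indices' list is the concatenation, over regions, of the contained phaseset indices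
theorem pvIndicesA_eq (ls le rs re : List Int) :
    pvIndicesA ls le rs re =
      (PySem.List.enumerate (ls.zip le)).flatMap (fun lp =>
        ((PySem.List.enumerate (rs.zip re)).filter
          (fun kp => decide (kp.2.1 ≥ lp.2.1 ∧ kp.2.2 ≤ lp.2.2))).map (·.1)) := by
  unfold pvIndicesA
  simp only [PySem.List.foldl_append_ite, PySem.List.foldl_append_eq_flatMap, List.nil_append]

-- membership in A's 'indices' at a natural index agrees with the mask lookup
theorem contains_eq_mask (ls le rs re : List Int) (k : Nat) :
    (pvIndicesA ls le rs re).contains (k : Int) =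
      (decide (k < (pvMask ls le rs re).length) && (pvMask ls le rs re).getD k false) := by
  rw [pvIndicesA_eq, Bool.eq_iff_iff]
  simp only [List.contains_iff_mem, List.mem_flatMap, List.mem_map, List.mem_filter,
    PySem.List.mem_enumerate_iff, pvMask, List.length_map, Bool.and_eq_true,
    decide_eq_true_eq, List.getD_eq_getElem?_getD, List.getElem?_map]
  constructor
  · rintro ⟨i, ⟨⟨j, hj, rfl⟩, kp, ⟨⟨m, hm, rfl⟩, hc⟩, hk⟩⟩
    simp only [zero_add] at hk hc ⊢
    have hmk : m = k := by exact_mod_cast hk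
    subst hmk
    refine ⟨hm, ?_⟩
    simp only [List.getElem?_eq_getElem hm, Option.map_some, Option.getD_some, List.any_eq_true,
      decide_eq_true_eq]
    refine ⟨(ls.zip le)[j], List.getElem_mem hj, ?_⟩
    simp only [List.getElem_zip] at hc ⊢
    exact ⟨hc.1, hc.2⟩
  · rintro ⟨hm, hany⟩
    simp only [List.getElem?_eq_getElem hm, Option.map_some, Option.getD_some, List.any_eq_true,
      decide_eq_true_eq] at hany
    obtain ⟨q, hq, hc⟩ := hany
    obtain ⟨j, hj, rfl⟩ := List.mem_iff_getElem.1 hq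
    refine ⟨_, ⟨j, hj, rfl⟩, ⟨(↑k, (rs.zip re)[k]), ⟨⟨k, hm, by simp⟩, by simpa [ge_iff_le] using hc⟩, by simp⟩⟩

-- the two per-list filters agree
theorem drop_eq_keep (ls le rs re xs : List Int) :
    pvDropA (pvIndicesA ls le rs re) xs = pvKeepB (pvMask ls le rs re) xs := by
  unfold pvDropA pvKeepB
  congr 1
  apply List.filter_congr
  intro p hp
  obtain ⟨k, hk, rfl⟩ := (PySem.List.mem_enumerate_iff _ _ _).1 hp
  simp only [zero_add, Int.toNat_natCast, contains_eq_mask]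

-- B's foldl prefix-max loop computes pvPmaxGo
theorem pref_foldl_go (t : List (Int × Int)) (cur : Int) (acc : List Int) :
    (t.foldl (fun (st : Option Int × List Int) r =>
      let cur := match st.1 with | none => r.2 | some c => max c r.2
      (some cur, st.2 ++ [cur])) (some cur, acc)) =
      (some ((t.map (·.2)).foldl max cur), acc ++ pvPmaxGo cur (t.map (·.2))) := by
  induction t generalizing cur acc with
  | nil => simp [pvPmaxGo]
  | cons r t ih => simp [pvPmaxGo, ih, List.append_assoc]

theorem pref_foldl (regions : List (Int × Int)) :
    (regions.foldl (fun (st : Option Int × List Int) r =>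
      let cur := match st.1 with | none => r.2 | some c => max c r.2
      (some cur, st.2 ++ [cur])) (none, [])).2 =
      match regions.map (·.2) with
      | [] => []
      | b :: t => pvPmaxGo b (b :: t) := by
  cases regions with
  | nil => simp
  | cons r t =>
    simp only [List.foldl_cons, List.map_cons]
    rw [pref_foldl_go]
    simp [pvPmaxGo]

-- reading the prefix-max list: entry k bounds e iff some earlier end (or cur) bounds e
theorem pmaxGo_le_iff (bs : List Int) (cur e : Int) (k : Nat) (hk : k < bs.length) :
    (e ≤ (pvPmaxGo cur bs).getD k 0) ↔ e ≤ cur ∨ ∃ j, j ≤ k ∧ ∃ hj : j < bs.length, e ≤ bs[j] := by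
  induction bs generalizing cur k with
  | nil => simp at hk
  | cons b t ih =>
    cases k with
    | zero =>
      simp only [pvPmaxGo, List.getD_cons_zero, le_max_iff]
      constructor
      · rintro (h | h)
        · exact Or.inl h
        · exact Or.inr ⟨0, le_refl _, by simp, by simpa using h⟩
      · rintro (h | ⟨j, hj0, hjlen, hle⟩)
        · exact Or.inl h
        · interval_cases j
          simpa using Or.inr hle
    | succ k =>
      simp only [pvPmaxGo, List.getD_cons_succ]
      rw [ih (max cur b) k (by simpa using hk)]
      constructor
      · rintro (h | ⟨j, hjk, hjlen, hle⟩)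
        · rcases le_max_iff.1 h with h | h
          · exact Or.inl h
          · exact Or.inr ⟨0, by omega, by simp, by simpa using h⟩
        · exact Or.inr ⟨j + 1, by omega, by simpa using hjlen, by simpa using hle⟩
      · rintro (h | ⟨j, hjk, hjlen, hle⟩)
        · exact Or.inl (le_max_iff.2 (Or.inl h))
        · cases j with
          | zero => exact Or.inl (le_max_iff.2 (Or.inr (by simpa using hle)))
          | succ j => exact Or.inr ⟨j, by omega, by simpa using hjlen, by simpa using hle⟩

-- reading B's prefix-max list of a nonempty ends list
theorem pmax_read (es : List Int) (e : Int) (k : Nat) (hk : k < es.length) :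
    (e ≤ (match es with | [] => ([] : List Int) | b :: t => pvPmaxGo b (b :: t)).getD k 0) ↔
      ∃ j, j ≤ k ∧ ∃ hj : j < es.length, e ≤ es[j] := by
  cases es with
  | nil => simp at hk
  | cons b t =>
    rw [pmaxGo_le_iff _ _ _ _ hk]
    constructor
    · rintro (h | h)
      · exact ⟨0, Nat.zero_le _, by simp, by simpa using h⟩
      · exact h
    · exact fun h => Or.inr h

-- binary-search invariant: on a sorted list, pvBsr partitions indices at the count of starts <= s
theorem pvBsr_spec (starts : List Int) (s : Int)
    (hs : List.Pairwise (· ≤ ·) starts) :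
    ∀ fuel lo hi, hi - lo ≤ fuel → lo ≤ hi → hi ≤ starts.length →
    (∀ j (hj : j < starts.length), j < lo → starts[j] ≤ s) →
    (∀ j (hj : j < starts.length), hi ≤ j → s < starts[j]) →
    pvBsr starts s fuel lo hi ≤ starts.length ∧
    (∀ j (hj : j < starts.length), j < pvBsr starts s fuel lo hi → starts[j] ≤ s) ∧
    (∀ j (hj : j < starts.length), pvBsr starts s fuel lo hi ≤ j → s < starts[j]) := by
  intro fuel
  induction fuel with
  | zero =>
    intro lo hi hfuel hlohi hhilen hbelow habove
    have hloeq : lo = hi := by omega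
    subst hloeq
    simp only [pvBsr]
    exact ⟨by omega, fun j hj hjl => hbelow j hj hjl, fun j hj hjg => habove j hj hjg⟩
  | succ fuel ih =>
    intro lo hi hfuel hlohi hhilen hbelow habove
    by_cases h : lo < hi
    · have hmid : (lo + hi) / 2 < starts.length := by omega
      have hget : starts.getD ((lo + hi) / 2) 0 = starts[(lo + hi) / 2] :=
        List.getD_eq_getElem _ _ hmid
      have hmono := List.pairwise_iff_getElem.1 hs
      rw [pvBsr, if_pos h]
      by_cases hle : starts.getD ((lo + hi) / 2) 0 ≤ s
      · rw [if_pos hle]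
        rw [hget] at hle
        refine ih ((lo + hi) / 2 + 1) hi (by omega) (by omega) hhilen ?_ habove
        intro j hj hjlt
        rcases Nat.lt_or_ge j ((lo + hi) / 2) with hlt | hge
        · exact (hmono j _ hj hmid hlt).trans hle
        · have hje : j = (lo + hi) / 2 := by omega
          subst hje; exact hle
      · rw [if_neg hle]
        have hle' : s < starts[(lo + hi) / 2] := by rw [← hget]; exact not_le.1 hle
        refine ih lo ((lo + hi) / 2) (by omega) (by omega) (by omega) hbelow ?_
        intro j hj hjge
        refine hle'.trans_le ?_
        rcases Nat.lt_or_ge ((lo + hi) / 2) j with hlt | hge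
        · exact hmono _ _ hmid hj hlt
        · have hje : j = (lo + hi) / 2 := by omega
          subst hje; exact le_refl _
    · rw [pvBsr, if_neg h]
      have hloeq : lo = hi := by omega
      subst hloeq
      exact ⟨by omega, fun j hj hjl => hbelow j hj hjl, fun j hj hjg => habove j hj hjg⟩

-- B's binary-search + prefix-max containment test equals the any-region scan
theorem contained_eq_any (ls le : List Int) (s e : Int) :
    pvContained ((PySem.List.sorted (ls.zip le) (fun r => r.1)).map (fun r => r.1))
      (match (PySem.List.sorted (ls.zip le) (fun r => r.1)).map (·.2) with
        | [] => []
        | b :: t => pvPmaxGo b (b :: t)) s e =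
      (ls.zip le).any (fun q => decide (q.1 ≤ s ∧ e ≤ q.2)) := by
  set regions := PySem.List.sorted (ls.zip le) (fun r => r.1) with hreg
  have hperm : regions.Perm (ls.zip le) := PySem.List.sorted_perm _ _ _
  have hsorted : List.Pairwise (· ≤ ·) (regions.map (fun r => r.1)) :=
    PySem.List.sorted_map_key_pairwise _ _
  rw [← hperm.any_eq]
  set starts := regions.map (fun r => r.1) with hst
  have hlen : starts.length = regions.length := by simp [hst]
  obtain ⟨hnle, hbel, habv⟩ :=
    pvBsr_spec starts s hsorted starts.length 0 starts.length (by omega) (Nat.zero_le _) le_rfl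
      (fun j hj hjl => absurd hjl (Nat.not_lt_zero j)) (fun j hj hjg => by omega)
  set n := pvBsr starts s starts.length 0 starts.length with hn
  rw [Bool.eq_iff_iff]
  unfold pvContained
  simp only [← hn, Bool.and_eq_true, decide_eq_true_eq, List.any_eq_true]
  have hlen2 : (regions.map (·.2)).length = regions.length := by simp
  constructor
  · rintro ⟨hpos, hle⟩
    have hklen : n - 1 < (regions.map (·.2)).length := by omega
    rw [pmax_read _ _ _ hklen] at hle
    obtain ⟨j, hjn, hjlen, hje⟩ := hle
    have hjreg : j < regions.length := by omega
    refine ⟨regions[j], List.getElem_mem hjreg, ?_⟩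
    have h1 : starts[j]'(by omega) ≤ s := hbel j (by omega) (by omega)
    have h1' : regions[j].1 ≤ s := by simpa [hst] using h1
    have hje' : e ≤ regions[j].2 := by simpa using hje
    exact ⟨h1', hje'⟩
  · rintro ⟨q, hq, hc⟩
    obtain ⟨j, hj, rfl⟩ := List.mem_iff_getElem.1 hq
    have hjstarts : j < starts.length := by omega
    have hjn : j < n := by
      by_contra hge
      have hja := habv j hjstarts (by omega)
      have hja' : s < regions[j].1 := by simpa [hst] using hja
      exact absurd hc.1 (not_le.2 hja')
    refine ⟨by omega, ?_⟩
    rw [pmax_read _ _ _ (by omega : n - 1 < (regions.map (·.2)).length)]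
    exact ⟨j, by omega, by simpa using hj, by simpa using hc.2⟩

-- B's removed list is the mask
theorem removed_eq_mask (ls le rs re : List Int) :
    ((rs.zip re).map (fun p =>
      pvContained ((PySem.List.sorted (ls.zip le) (fun r => r.1)).map (fun r => r.1))
        ((PySem.List.sorted (ls.zip le) (fun r => r.1)).foldl (fun (st : Option Int × List Int) r =>
          let cur := match st.1 with | none => r.2 | some c => max c r.2
          (some cur, st.2 ++ [cur])) (none, [])).2 p.1 p.2)) =
      pvMask ls le rs re := by
  unfold pvMask
  apply List.map_congr_left
  intro p _
  rw [pref_foldl, contained_eq_any]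

-- ===== VERDICT (by name: the statement is the Claim_ definition above) =====
theorem loh_regions_phasesets_spec : Claim_equal_loh_regions_phasesets := by
  intro ls le h1 h2 rs re _
  show _ = _
  unfold loh_regions_phasesets loh_regions_phasesets_alt
  simp only [removed_eq_mask, drop_eq_keep]
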